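-- pv_equiv track=rewrite | github.com/polllllya/pjatk-python | List02/script02.py | do_degree
-- ===== SOURCE A (Python) =====
-- def do_degree(lst):
--     degrees = []
--     number = 2
--     for i in lst:
--         if (i % 2 == 0) and (number != 0):
--             degrees.append(i ** 2)
--             number -= 1
--     return degrees
-- ===== SOURCE B (Python) =====
-- def do_degree(lst):
--     return [i ** 2 for i in lst if i % 2 == 0][:2]
-- ===== Notes on version B (the rewrite author's own statement) =====
-- stated objective: simpler
-- what changed: Replaced the counter-gated accumulator loop with a filter-square comprehension followed by a slice that takes the first two results.
import Mathlib
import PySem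

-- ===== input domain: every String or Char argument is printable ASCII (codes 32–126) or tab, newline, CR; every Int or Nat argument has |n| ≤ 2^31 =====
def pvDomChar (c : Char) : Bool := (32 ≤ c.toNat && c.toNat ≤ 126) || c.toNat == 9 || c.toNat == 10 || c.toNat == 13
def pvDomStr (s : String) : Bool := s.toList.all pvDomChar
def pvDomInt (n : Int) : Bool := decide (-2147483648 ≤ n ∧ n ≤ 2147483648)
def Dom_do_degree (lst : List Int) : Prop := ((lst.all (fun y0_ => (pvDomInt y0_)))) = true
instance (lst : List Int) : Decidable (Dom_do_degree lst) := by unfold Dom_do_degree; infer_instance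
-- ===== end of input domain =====

-- B replaces A's counter-gated accumulator loop with filter/map-then-take-2: simpler decomposition.


-- ===== PORT A =====
-- loop state: (degrees, number); exact per-element branch of A
def do_degree (lst : List Int) : List Int :=
  (lst.foldl
    (fun (st : List Int × Int) i =>
      if PySem.Int.mod i 2 = 0 ∧ st.2 ≠ 0 then (st.1 ++ [i ^ 2], st.2 - 1) else st)
    ([], 2)).1

-- ===== PORT B =====
def do_degree_alt (lst : List Int) : List Int :=
  ((lst.filter (fun i => PySem.Int.mod i 2 = 0)).map (fun i => i ^ 2)).take 2

-- ===== PRECONDITION & SPEC =====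
def Spec_do_degree (lst : List Int) (out : List Int) : Prop := out = do_degree_alt lst
instance (lst : List Int) (out : List Int) : Decidable (Spec_do_degree lst out) := by unfold Spec_do_degree; infer_instance

-- ===== CLAIM (what is proved, stated in full; the proofs are below) =====
def Claim_equal_do_degree : Prop := ∀ (lst : List Int), Dom_do_degree lst → Spec_do_degree lst (do_degree lst)

-- ===== LEMMAS AND PROOFS =====
-- loop invariant: starting from (acc, n) with n a natural literal, the fold appends
-- the first n even-squares to acc
theorem do_degree_fold (lst : List Int) (acc : List Int) (n : Nat) :
    (lst.foldl
      (fun (st : List Int × Int) i =>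
        if PySem.Int.mod i 2 = 0 ∧ st.2 ≠ 0 then (st.1 ++ [i ^ 2], st.2 - 1) else st)
      (acc, (n : Int))).1
    = acc ++ ((lst.filter (fun i => PySem.Int.mod i 2 = 0)).map (fun i => i ^ 2)).take n := by
  induction lst generalizing acc n with
  | nil => simp
  | cons i t ih =>
    by_cases he : PySem.Int.mod i 2 = 0
    · cases n with
      | zero =>
        simp only [List.foldl_cons, List.filter_cons, he]
        rw [if_neg (by simp)]
        simpa using ih acc 0
      | succ m =>
        simp only [List.foldl_cons, List.filter_cons, he]
        rw [if_pos (by refine ⟨trivial, ?_⟩; push_cast; omega)]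
        have : ((m : Int) + 1) - 1 = (m : Int) := by ring
        simp only [show ((Nat.succ m : Int)) - 1 = (m : Int) by push_cast; ring]
        rw [ih (acc ++ [i ^ 2]) m]
        simp [List.take_succ_cons]
    · simp only [List.foldl_cons, List.filter_cons, he]
      rw [if_neg (by simp)]
      simpa using ih acc n

-- ===== VERDICT (by name: the statement is the Claim_ definition above) =====
theorem do_degree_spec : Claim_equal_do_degree := by
  intro lst _
  unfold Spec_do_degree do_degree do_degree_alt
  simpa using do_degree_fold lst [] 2
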